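-- pv_equiv track=rewrite | github.com/kjfsoul/sentient_venture_engine | agents/validation_tools.py | _customize_flow_for_features
-- ===== SOURCE A (Python) =====
-- from typing import Dict, List, Any, Optional, Tuple, Union
--
-- def _customize_flow_for_features(base_flow: List[str], features: List[str]) -> List[str]:
--     """Customize user flow based on specific features"""
--     customized_flow = base_flow.copy()
--
--     # Add feature-specific steps
--     feature_mappings = {
--         'analytics': 'Analytics Dashboard',
--         'reporting': 'Reports & Insights',
--         'automation': 'Automation Setup',
--         'integration': 'Integrations',
--         'collaboration': 'Team Collaboration',
--         'customization': 'Customization Options'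
--     }
--
--     for feature in features:
--         feature_lower = feature.lower()
--         for key, step in feature_mappings.items():
--             if key in feature_lower and step not in customized_flow:
--                 # Insert after main dashboard
--                 if 'Main Dashboard' in customized_flow:
--                     insert_index = customized_flow.index('Main Dashboard') + 1
--                     customized_flow.insert(insert_index, step)
--                 else:
--                     customized_flow.append(step)
--
--     return customized_flow
-- ===== SOURCE B (Python) =====
-- def _customize_flow_for_features(base_flow, features):
--     """Customize user flow based on specific features"""
--     feature_mappings = {
--         'analytics': 'Analytics Dashboard',
--         'reporting': 'Reports & Insights',
--         'automation': 'Automation Setup',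
--         'integration': 'Integrations',
--         'collaboration': 'Team Collaboration',
--         'customization': 'Customization Options'
--     }
--     # Phase 1: decide WHAT to add (dedup against base_flow and earlier additions)
--     seen = set(base_flow)
--     added = []
--     for feature in features:
--         feature_lower = feature.lower()
--         for key, step in feature_mappings.items():
--             if key in feature_lower and step not in seen:
--                 added.append(step)
--                 seen.add(step)
--     # Phase 2: decide WHERE to place it
--     if 'Main Dashboard' in base_flow:
--         i = base_flow.index('Main Dashboard') + 1
--         return base_flow[:i] + added[::-1] + base_flow[i:]
--     return base_flow + added
-- ===== Notes on version B (the rewrite author's own statement) =====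
-- stated objective: alternative
-- what changed: B splits the work into two phases: one pass over features collecting the steps to add while deduplicating against a seen-set seeded from base_flow, then a single batched splice (reversed, after 'Main Dashboard') or append, instead of A's repeated membership-scan, index and in-place insert on the growing flow list.
import Mathlib
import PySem

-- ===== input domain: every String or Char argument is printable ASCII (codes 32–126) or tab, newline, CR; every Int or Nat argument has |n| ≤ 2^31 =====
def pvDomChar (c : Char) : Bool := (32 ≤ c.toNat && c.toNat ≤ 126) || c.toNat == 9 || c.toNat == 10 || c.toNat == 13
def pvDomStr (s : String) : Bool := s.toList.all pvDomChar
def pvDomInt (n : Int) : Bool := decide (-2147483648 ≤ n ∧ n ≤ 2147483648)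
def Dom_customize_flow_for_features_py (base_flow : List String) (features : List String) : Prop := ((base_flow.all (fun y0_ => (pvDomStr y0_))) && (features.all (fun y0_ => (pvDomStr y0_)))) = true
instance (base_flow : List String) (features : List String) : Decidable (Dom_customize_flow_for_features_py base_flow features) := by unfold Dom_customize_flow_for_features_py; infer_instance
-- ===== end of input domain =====

-- B separates the decision of WHAT steps to add (one pass with a seen-set) from WHERE to
-- place them (a single batched splice after 'Main Dashboard', or an append): objective 'alternative'.

-- the fixed feature→step mapping, in the Python dict's insertion order (shared data of A and B)
def pvMappings : List (String × String) :=
  [("analytics", "Analytics Dashboard"),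
   ("reporting", "Reports & Insights"),
   ("automation", "Automation Setup"),
   ("integration", "Integrations"),
   ("collaboration", "Team Collaboration"),
   ("customization", "Customization Options")]

-- ===== PORT A =====
-- body of A's inner loop: maybe insert `step` into the growing customized_flow
def pvInnerA (fl : String) (cf : List String) (p : String × String) : List String :=
  if PySem.Str.isIn p.1 fl = true ∧ p.2 ∉ cf then
    if "Main Dashboard" ∈ cf then
      PySem.List.insert cf (((PySem.List.index? cf "Main Dashboard").getD 0 : Int) + 1) p.2
    else cf ++ [p.2]
  else cf

def customize_flow_for_features_py (base_flow : List String) (features : List String) : List String :=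
  features.foldl (fun cf feature => pvMappings.foldl (pvInnerA (PySem.Str.lower feature)) cf) base_flow

-- ===== PORT B =====
-- body of B's inner loop: collect `step` into `added` and record it in `seen`
def pvInnerB (fl : String) (st : List String × PySem.Set String) (p : String × String) :
    List String × PySem.Set String :=
  if PySem.Str.isIn p.1 fl = true ∧ PySem.Set.contains st.2 p.2 = false then
    (st.1 ++ [p.2], PySem.Set.add st.2 p.2)
  else st

def customize_flow_for_features_py_alt (base_flow : List String) (features : List String) : List String :=
  let added := (features.foldl (fun st feature => pvMappings.foldl (pvInnerB (PySem.Str.lower feature)) st)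
      (([] : List String), PySem.Set.ofList base_flow)).1
  if "Main Dashboard" ∈ base_flow then
    -- base_flow[:i] + added[::-1] + base_flow[i:] with i = base_flow.index('Main Dashboard')+1 (nonneg in-range slice = take/drop)
    let i := (PySem.List.index? base_flow "Main Dashboard").getD 0 + 1
    base_flow.take i ++ added.reverse ++ base_flow.drop i
  else base_flow ++ added

-- ===== PRECONDITION & SPEC =====
def Spec_customize_flow_for_features_py (base_flow : List String) (features : List String) (out : List String) : Prop := out = customize_flow_for_features_py_alt base_flow features
instance (base_flow : List String) (features : List String) (out : List String) : Decidable (Spec_customize_flow_for_features_py base_flow features out) := by unfold Spec_customize_flow_for_features_py; infer_instance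

-- ===== CLAIM (what is proved, stated in full; the proofs are below) =====
def Claim_equal_customize_flow_for_features_py : Prop := ∀ (base_flow : List String) (features : List String), Dom_customize_flow_for_features_py base_flow features → Spec_customize_flow_for_features_py base_flow features (customize_flow_for_features_py base_flow features)

-- ===== LEMMAS AND PROOFS =====

-- B's placement of a collected batch `added`, as a function (definitionally B's final expression)
def pvEmbed (base added : List String) : List String :=
  if "Main Dashboard" ∈ base then
    let i := (PySem.List.index? base "Main Dashboard").getD 0 + 1
    base.take i ++ added.reverse ++ base.drop i
  else base ++ added

-- invariant carried through the folds
def pvInv (base added : List String) (seen : PySem.Set String) : Prop :=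
  (∀ x, x ∈ seen ↔ x ∈ base ∨ x ∈ added) ∧ "Main Dashboard" ∉ added

lemma pvEmbed_nil (base : List String) : pvEmbed base [] = base := by
  unfold pvEmbed
  split_ifs with h
  · simp
  · simp

lemma pvDecomp (base : List String) (h : "Main Dashboard" ∈ base) :
    ∃ pre suf, base = pre ++ "Main Dashboard" :: suf ∧ "Main Dashboard" ∉ pre ∧
      PySem.List.index? base "Main Dashboard" = some pre.length := by
  obtain ⟨k, hk⟩ := Option.isSome_iff_exists.1 ((PySem.List.index?_isSome_iff base "Main Dashboard").2 h)
  obtain ⟨pre, suf, hsplit, hlen, hnot⟩ := (PySem.List.index?_eq_some_iff base "Main Dashboard" k).1 hk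
  exact ⟨pre, suf, hsplit, hnot, by rw [hk, hlen]⟩

lemma pvEmbed_eq (base pre suf added : List String)
    (hsplit : base = pre ++ "Main Dashboard" :: suf) (hpre : "Main Dashboard" ∉ pre) :
    pvEmbed base added = pre ++ "Main Dashboard" :: (added.reverse ++ suf) := by
  have hmem : "Main Dashboard" ∈ base := by rw [hsplit]; simp
  have hidx : PySem.List.index? base "Main Dashboard" = some pre.length := by
    exact (PySem.List.index?_eq_some_iff base "Main Dashboard" pre.length).2 ⟨pre, suf, hsplit, rfl, hpre⟩
  unfold pvEmbed
  rw [if_pos hmem, hidx, hsplit]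
  have ht : List.take (pre.length + 1) pre = pre := List.take_of_length_le (by omega)
  have hd : List.drop (pre.length + 1) pre = ([] : List String) := List.drop_eq_nil_of_le (by omega)
  simp [List.take_append, List.drop_append, ht, hd]

lemma pvMem_embed (base added : List String) (x : String) :
    x ∈ pvEmbed base added ↔ x ∈ base ∨ x ∈ added := by
  by_cases h : "Main Dashboard" ∈ base
  · obtain ⟨pre, suf, hsplit, hpre, -⟩ := pvDecomp base h
    rw [pvEmbed_eq base pre suf added hsplit hpre, hsplit]
    simp
    tauto
  · unfold pvEmbed
    rw [if_neg h]
    simp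

-- one step of the inner loop preserves the correspondence
lemma pvStep (base : List String) (fl : String) (p : String × String)
    (hp : p.2 ≠ "Main Dashboard") (added : List String) (seen : PySem.Set String)
    (hinv : pvInv base added seen) :
    pvInnerA fl (pvEmbed base added) p = pvEmbed base (pvInnerB fl (added, seen) p).1 ∧
    pvInv base (pvInnerB fl (added, seen) p).1 (pvInnerB fl (added, seen) p).2 := by
  obtain ⟨hseen, hMD⟩ := hinv
  by_cases hc : PySem.Str.isIn p.1 fl = true ∧ PySem.Set.contains seen p.2 = false
  · -- the guard fires in both programs
    have hnotseen : p.2 ∉ seen := by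
      intro hmem
      have := (PySem.Set.contains_iff seen p.2).2 hmem
      rw [hc.2] at this; exact Bool.false_ne_true this
    have hnb : p.2 ∉ base := fun hb => hnotseen ((hseen p.2).2 (Or.inl hb))
    have hna : p.2 ∉ added := fun ha => hnotseen ((hseen p.2).2 (Or.inr ha))
    have hnotcf : p.2 ∉ pvEmbed base added := by
      rw [pvMem_embed]; tauto
    have hcA : PySem.Str.isIn p.1 fl = true ∧ p.2 ∉ pvEmbed base added := ⟨hc.1, hnotcf⟩
    rw [show pvInnerB fl (added, seen) p = (added ++ [p.2], PySem.Set.add seen p.2) from by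
      unfold pvInnerB; rw [if_pos hc]]
    refine ⟨?_, ?_, ?_⟩
    · unfold pvInnerA
      rw [if_pos hcA]
      by_cases h : "Main Dashboard" ∈ base
      · obtain ⟨pre, suf, hsplit, hpre, -⟩ := pvDecomp base h
        have he := pvEmbed_eq base pre suf added hsplit hpre
        have he' := pvEmbed_eq base pre suf (added ++ [p.2]) hsplit hpre
        have hmd : "Main Dashboard" ∈ pvEmbed base added := by rw [pvMem_embed]; tauto
        rw [if_pos hmd, he, he']
        have hidx : PySem.List.index? (pre ++ "Main Dashboard" :: (added.reverse ++ suf)) "Main Dashboard"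
            = some pre.length :=
          (PySem.List.index?_eq_some_iff _ "Main Dashboard" pre.length).2
            ⟨pre, added.reverse ++ suf, rfl, rfl, hpre⟩
        rw [hidx]
        have hcast : ((some pre.length).getD 0 : Int) + 1 = ((pre.length + 1 : Nat) : Int) := by
          simp
        rw [hcast, PySem.List.insert_natCast _ _ _ (by simp)]
        have ht : List.take (pre.length + 1) pre = pre := List.take_of_length_le (by omega)
        have hd : List.drop (pre.length + 1) pre = ([] : List String) := List.drop_eq_nil_of_le (by omega)
        simp [List.take_append, List.drop_append, ht, hd]
      · have hmd : "Main Dashboard" ∉ pvEmbed base added := by rw [pvMem_embed]; tauto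
        rw [if_neg hmd]
        unfold pvEmbed
        rw [if_neg h, if_neg h]
        simp
    · intro x
      rw [PySem.Set.mem_add]
      constructor
      · rintro (hx | rfl)
        · rcases (hseen x).1 hx with hb | ha
          · exact Or.inl hb
          · right; simp [ha]
        · right; simp
      · rintro (hb | hx)
        · exact Or.inl ((hseen x).2 (Or.inl hb))
        · rcases List.mem_append.1 hx with ha | he
          · exact Or.inl ((hseen x).2 (Or.inr ha))
          · right; simpa using he
    · intro hmem
      rcases List.mem_append.1 hmem with ha | he
      · exact hMD ha
      · exact hp (List.mem_singleton.1 he).symm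
  · -- the guard fires in neither program
    have hB : pvInnerB fl (added, seen) p = (added, seen) := by
      unfold pvInnerB; rw [if_neg hc]
    rw [hB]
    refine ⟨?_, hseen, hMD⟩
    unfold pvInnerA
    have hA : ¬ (PySem.Str.isIn p.1 fl = true ∧ p.2 ∉ pvEmbed base added) := by
      intro hA
      apply hc
      refine ⟨hA.1, ?_⟩
      have hns : p.2 ∉ seen := by
        intro hmem
        rcases (hseen p.2).1 hmem with hb | ha
        · exact hA.2 ((pvMem_embed base added p.2).2 (Or.inl hb))
        · exact hA.2 ((pvMem_embed base added p.2).2 (Or.inr ha))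
      cases hcc : PySem.Set.contains seen p.2
      · rfl
      · exact absurd ((PySem.Set.contains_iff seen p.2).1 hcc) hns
    rw [if_neg hA]

-- the inner fold over a mapping list whose steps are never 'Main Dashboard'
lemma pvFoldInner (base : List String) (fl : String) (ps : List (String × String))
    (hps : ∀ p ∈ ps, p.2 ≠ "Main Dashboard") :
    ∀ (added : List String) (seen : PySem.Set String), pvInv base added seen →
      ps.foldl (pvInnerA fl) (pvEmbed base added) = pvEmbed base (ps.foldl (pvInnerB fl) (added, seen)).1 ∧
      pvInv base (ps.foldl (pvInnerB fl) (added, seen)).1 (ps.foldl (pvInnerB fl) (added, seen)).2 := by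
  induction ps with
  | nil => intro added seen hinv; exact ⟨rfl, hinv⟩
  | cons p ps ih =>
    intro added seen hinv
    obtain ⟨h1, h2⟩ := pvStep base fl p (hps p (by simp)) added seen hinv
    simp only [List.foldl_cons]
    rw [h1]
    have := ih (fun q hq => hps q (by simp [hq])) (pvInnerB fl (added, seen) p).1 (pvInnerB fl (added, seen) p).2 h2
    simpa using this

-- the outer fold over features
lemma pvFoldOuter (base : List String) (features : List String) :
    ∀ (added : List String) (seen : PySem.Set String), pvInv base added seen →
      features.foldl (fun cf feature => pvMappings.foldl (pvInnerA (PySem.Str.lower feature)) cf) (pvEmbed base added)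
        = pvEmbed base (features.foldl (fun st feature => pvMappings.foldl (pvInnerB (PySem.Str.lower feature)) st) (added, seen)).1 := by
  induction features with
  | nil => intro added seen _; rfl
  | cons f fs ih =>
    intro added seen hinv
    have hps : ∀ p ∈ pvMappings, p.2 ≠ "Main Dashboard" := by decide
    obtain ⟨h1, h2⟩ := pvFoldInner base (PySem.Str.lower f) pvMappings hps added seen hinv
    simp only [List.foldl_cons]
    rw [h1]
    have := ih (pvMappings.foldl (pvInnerB (PySem.Str.lower f)) (added, seen)).1
      (pvMappings.foldl (pvInnerB (PySem.Str.lower f)) (added, seen)).2 h2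
    simpa using this

-- ===== VERDICT (by name: the statement is the Claim_ definition above) =====
theorem customize_flow_for_features_py_spec : Claim_equal_customize_flow_for_features_py := by
  intro base features _
  unfold Spec_customize_flow_for_features_py customize_flow_for_features_py customize_flow_for_features_py_alt
  have hinv : pvInv base [] (PySem.Set.ofList base) := by
    constructor
    · intro x; rw [PySem.Set.mem_ofList]; simp
    · simp
  have h := pvFoldOuter base features [] (PySem.Set.ofList base) hinv
  rw [pvEmbed_nil] at h
  rw [h]
  rfl
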